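-- pv_equiv track=rewrite | github.com/kayseapet/TFWeekly | Unit 3: Stacks & Queues/session2.py | process_performance_requests
-- ===== SOURCE A (Python) =====
-- import heapq
--
-- def process_performance_requests(requests):
--     final = []
--     queue = []
--     for num, r in requests:
--         heapq.heappush(queue,(-num,r))
--
--     while queue:
--         num, name = heapq.heappop(queue)
--         final.append(name)
--     return final
-- ===== SOURCE B (Python) =====
-- def process_performance_requests(requests):
--     ordered = sorted(requests, key=lambda t: (-t[0], t[1]))
--     return [name for _, name in ordered]
-- ===== Notes on version B (the rewrite author's own statement) =====
-- stated objective: idiomatic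
-- what changed: Replaces the heapq push-all/pop-all priority queue with a single stable sort by key (-num, name) followed by a name projection.
import Mathlib
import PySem

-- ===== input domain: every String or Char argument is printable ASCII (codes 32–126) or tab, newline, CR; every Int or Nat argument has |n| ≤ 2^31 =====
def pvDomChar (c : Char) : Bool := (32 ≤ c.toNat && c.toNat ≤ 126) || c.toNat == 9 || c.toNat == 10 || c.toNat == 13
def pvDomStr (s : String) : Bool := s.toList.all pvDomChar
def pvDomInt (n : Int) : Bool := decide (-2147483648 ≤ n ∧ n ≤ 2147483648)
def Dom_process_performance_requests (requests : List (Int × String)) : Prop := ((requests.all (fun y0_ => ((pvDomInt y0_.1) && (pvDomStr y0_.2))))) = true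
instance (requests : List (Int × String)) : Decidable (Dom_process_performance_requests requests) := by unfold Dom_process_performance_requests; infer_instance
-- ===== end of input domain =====

-- B replaces A's heapq push-all/pop-all priority queue with one stable sort by key (-num, name)
-- plus a name projection (idiomatic; same O(n log n) cost).

-- ===== PORT A =====
-- Python's `<` on (int, str) tuples: lexicographic (first ints, then strings by code point).
-- The heapq loops are ported as structural recursions on an explicit iteration-count bound
-- (pos for _siftdown, endpos - childpos for _siftup's loop, len(heap) for the drain loop);
-- each bound exactly covers the Python loop's iterations, so behaviour is identical.
def pvLt (a b : Int × String) : Bool := decide (a.1 < b.1) || (a.1 == b.1 && decide (a.2 < b.2))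

def pvSiftdownGo : Nat → List (Int × String) → Nat → Nat → (Int × String) → List (Int × String)
  | 0, heap, _, pos, newitem => heap.set pos newitem
  | fuel + 1, heap, startpos, pos, newitem =>
    if startpos < pos then
      let parentpos := (pos - 1) / 2
      let parent := heap.getD parentpos (0, "")
      if pvLt newitem parent then pvSiftdownGo fuel (heap.set pos parent) startpos parentpos newitem
      else heap.set pos newitem
    else heap.set pos newitem

def pvSiftdown (heap : List (Int × String)) (startpos pos : Nat) (newitem : Int × String) : List (Int × String) :=
  pvSiftdownGo pos heap startpos pos newitem

def pvHeappush (heap : List (Int × String)) (item : Int × String) : List (Int × String) :=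
  pvSiftdown (heap ++ [item]) 0 heap.length item

def pvSiftupLoopGo : Nat → List (Int × String) → Nat → Nat → Nat → List (Int × String) × Nat
  | 0, heap, _, pos, _ => (heap, pos)
  | fuel + 1, heap, endpos, pos, childpos =>
    if childpos < endpos then
      let rightpos := childpos + 1
      let childpos' := if rightpos < endpos && !(pvLt (heap.getD childpos (0, "")) (heap.getD rightpos (0, ""))) then rightpos else childpos
      pvSiftupLoopGo fuel (heap.set pos (heap.getD childpos' (0, ""))) endpos childpos' (2 * childpos' + 1)
    else (heap, pos)

def pvSiftupLoop (heap : List (Int × String)) (endpos pos childpos : Nat) : List (Int × String) × Nat :=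
  pvSiftupLoopGo (endpos - childpos) heap endpos pos childpos

def pvSiftup (heap : List (Int × String)) (pos : Nat) : List (Int × String) :=
  let endpos := heap.length
  let newitem := heap.getD pos (0, "")
  let r := pvSiftupLoop heap endpos pos (2 * pos + 1)
  pvSiftdown (r.1.set r.2 newitem) pos r.2 newitem


def pvDrainGo : Nat → List (Int × String) → List String → List String
  | 0, _, final => final
  | fuel + 1, heap, final =>
    if hne : heap = [] then final
    else
      let lastelt := heap.getLast hne
      let rest := heap.dropLast
      if rest = [] then final ++ [lastelt.2]
      else
        let returnitem := rest.getD 0 (0, "")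
        pvDrainGo fuel (pvSiftup (rest.set 0 lastelt) 0) (final ++ [returnitem.2])

def pvDrain (heap : List (Int × String)) (final : List String) : List String :=
  pvDrainGo heap.length heap final

def process_performance_requests (requests : List (Int × String)) : List String :=
  let queue := requests.foldl (fun q pr => pvHeappush q (-pr.1, pr.2)) []
  pvDrain queue []

-- ===== PORT B =====
def process_performance_requests_alt (requests : List (Int × String)) : List String :=
  (PySem.List.sorted2 requests (fun t => -t.1) (fun t => t.2) false).map (fun t => t.2)

-- ===== PRECONDITION & SPEC =====
def Spec_process_performance_requests (requests : List (Int × String)) (out : List String) : Prop := out = process_performance_requests_alt requests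
instance (requests : List (Int × String)) (out : List String) : Decidable (Spec_process_performance_requests requests out) := by unfold Spec_process_performance_requests; infer_instance

-- ===== CLAIM (what is proved, stated in full; the proofs are below) =====
def Claim_equal_process_performance_requests : Prop := ∀ (requests : List (Int × String)), Dom_process_performance_requests requests → Spec_process_performance_requests requests (process_performance_requests requests)

-- ===== LEMMAS AND PROOFS =====
lemma length_pvSiftdownGo (fuel : Nat) : ∀ (heap : List (Int × String)) (s p : Nat) (n : Int × String),
    (pvSiftdownGo fuel heap s p n).length = heap.length := by
  induction fuel with
  | zero => intro heap s p n; simp [pvSiftdownGo]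
  | succ fuel ih => intro heap s p n; simp only [pvSiftdownGo]; split <;> [skip; simp]; split <;> simp [ih]

lemma length_pvSiftupLoopGo (fuel : Nat) : ∀ (heap : List (Int × String)) (e p c : Nat),
    (pvSiftupLoopGo fuel heap e p c).1.length = heap.length := by
  induction fuel with
  | zero => intro heap e p c; rfl
  | succ fuel ih => intro heap e p c; simp only [pvSiftupLoopGo]; split <;> simp [ih]

lemma length_pvSiftup (heap : List (Int × String)) (pos : Nat) :
    (pvSiftup heap pos).length = heap.length := by
  simp [pvSiftup, pvSiftdown, pvSiftupLoop, length_pvSiftdownGo, length_pvSiftupLoopGo]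


lemma pvLt_eq (a b : Int × String) : pvLt a b = decide (toLex a < toLex b) := by
  by_cases h1 : a.1 < b.1 <;> by_cases h2 : a.1 = b.1 <;>
    simp [pvLt, Prod.Lex.lt_iff, h1, h2]

def pvLe (a b : Int × String) : Prop := toLex a ≤ toLex b

def pvInv (h : List (Int × String)) : Prop :=
  ∀ i : Nat, 0 < i → i < h.length → pvLe (h.getD ((i - 1) / 2) (0, "")) (h.getD i (0, ""))

lemma getD_set_self (l : List (Int×String)) (i : Nat) (a : Int×String) (hi : i < l.length) :
    (l.set i a).getD i (0,"") = a := by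
  rw [List.getD_eq_getElem _ _ (by simpa using hi)]; simp

lemma getD_set_ne (l : List (Int×String)) (i j : Nat) (a : Int×String) (hij : i ≠ j) :
    (l.set i a).getD j (0,"") = l.getD j (0,"") := by
  simp [List.getD_eq_getElem?_getD, List.getElem?_set_ne hij]

lemma perm_getD_set (t : List (Int × String)) (k : Nat) (x : Int × String) (hk : k < t.length) :
    List.Perm (t.getD k (0, "") :: t.set k x) (x :: t) := by
  induction t generalizing k with
  | nil => simp at hk
  | cons b u ih =>
    cases k with
    | zero => simpa using List.Perm.swap x b u
    | succ k =>
      simp only [List.getD_cons_succ, List.set_cons_succ]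
      have h1 : List.Perm (u.getD k (0,"") :: b :: u.set k x) (b :: u.getD k (0,"") :: u.set k x) :=
        List.Perm.swap _ _ _
      have h2 := (ih k (by simpa using hk)).cons b
      have h3 : List.Perm (b :: x :: u) (x :: b :: u) := List.Perm.swap _ _ _
      exact (h1.trans h2).trans h3

lemma perm_set_set (h : List (Int × String)) (i j : Nat) (x : Int × String)
    (hij : i ≠ j) (hi : i < h.length) (hj : j < h.length) :
    List.Perm ((h.set i (h.getD j (0, ""))).set j x) (h.set i x) := by
  induction h generalizing i j with
  | nil => simp at hi
  | cons a t ih =>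
    cases i with
    | zero =>
      cases j with
      | zero => exact absurd rfl hij
      | succ k =>
        simp only [List.getD_cons_succ, List.set_cons_zero, List.set_cons_succ]
        exact perm_getD_set t k x (by simpa using hj)
    | succ m =>
      cases j with
      | zero =>
        simp only [List.getD_cons_zero, List.set_cons_succ, List.set_cons_zero]
        have := perm_getD_set (t.set m a) m x (by simpa using hi)
        rw [getD_set_self _ _ _ (by simpa using hi), List.set_set] at this
        exact this.symm
      | succ k =>
        simp only [List.getD_cons_succ, List.set_cons_succ]
        exact (ih m k (by omega) (by simpa using hi) (by simpa using hj)).cons a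

-- final placement of newitem at the hole
lemma pvPlace_inv (h : List (Int × String)) (pos : Nat) (n : Int × String)
    (hpos : pos < h.length)
    (I1 : ∀ i : Nat, 0 < i → i < h.length → i ≠ pos → (i - 1) / 2 ≠ pos →
      pvLe (h.getD ((i - 1) / 2) (0, "")) (h.getD i (0, "")))
    (I3 : ∀ c : Nat, c < h.length → (c - 1) / 2 = pos → 0 < c →
      pvLe n (h.getD c (0, "")))
    (hge : 0 < pos → pvLe (h.getD ((pos - 1) / 2) (0, "")) n) :
    pvInv (h.set pos n) := by
  intro i hi0 hilen
  rw [List.length_set] at hilen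
  by_cases hip : i = pos
  · subst hip
    rw [getD_set_self _ _ _ hpos, getD_set_ne _ _ _ _ (show i ≠ (i-1)/2 by omega)]
    exact hge hi0
  · by_cases hpip : (i - 1) / 2 = pos
    · rw [hpip, getD_set_self _ _ _ hpos, getD_set_ne _ _ _ _ (Ne.symm hip)]
      exact I3 i hilen hpip hi0
    · rw [getD_set_ne _ _ _ _ (Ne.symm hpip), getD_set_ne _ _ _ _ (Ne.symm hip)]
      exact I1 i hi0 hilen hip hpip

lemma pvSiftdownGo_spec (fuel : Nat) : ∀ (h : List (Int × String)) (pos : Nat) (n : Int × String),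
    pos ≤ fuel → pos < h.length →
    (∀ i : Nat, 0 < i → i < h.length → i ≠ pos → (i - 1) / 2 ≠ pos →
      pvLe (h.getD ((i - 1) / 2) (0, "")) (h.getD i (0, ""))) →
    (∀ c : Nat, c < h.length → 0 < pos → (c - 1) / 2 = pos →
      pvLe (h.getD ((pos - 1) / 2) (0, "")) (h.getD c (0, ""))) →
    (∀ c : Nat, c < h.length → (c - 1) / 2 = pos → 0 < c →
      pvLe n (h.getD c (0, ""))) →
    pvInv (pvSiftdownGo fuel h 0 pos n) ∧ List.Perm (pvSiftdownGo fuel h 0 pos n) (h.set pos n) := by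
  induction fuel with
  | zero =>
    intro h pos n hk hpos I1 I2 I3
    have hp0 : pos = 0 := by omega
    subst hp0
    exact ⟨pvPlace_inv h 0 n hpos I1 I3 (fun h0 => absurd h0 (lt_irrefl 0)), List.Perm.refl _⟩
  | succ fuel ih =>
    intro h pos n hk hpos I1 I2 I3
    simp only [pvSiftdownGo]
    split
    case isFalse hp =>
      have hp0 : pos = 0 := by omega
      subst hp0
      exact ⟨pvPlace_inv h 0 n hpos I1 I3 (fun h0 => absurd h0 (lt_irrefl 0)), List.Perm.refl _⟩
    case isTrue hp =>
      split
      case isTrue hlt =>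
        have hq : (pos - 1) / 2 < pos := by omega
        have hlt' : toLex n < toLex (h.getD ((pos-1)/2) (0,"")) := by
          rw [pvLt_eq] at hlt; exact of_decide_eq_true hlt
        have hqlen : (pos - 1) / 2 < h.length := by omega
        have hres := ih (h.set pos (h.getD ((pos-1)/2) (0,""))) ((pos-1)/2) n (by omega)
          (by simpa using hqlen) ?_ ?_ ?_
        · exact ⟨hres.1, hres.2.trans (perm_set_set h pos ((pos-1)/2) n (by omega) hpos hqlen)⟩
        -- I1'
        · intro i hi0 hilen hine hipar
          rw [List.length_set] at hilen
          by_cases hip : i = pos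
          · exact absurd (by rw [hip]) hipar
          · by_cases hpip : (i - 1) / 2 = pos
            · rw [getD_set_ne _ _ _ _ (Ne.symm hip)]
              rw [hpip, getD_set_self _ _ _ hpos]
              exact I2 i hilen hp hpip
            · rw [getD_set_ne _ _ _ _ (Ne.symm hpip), getD_set_ne _ _ _ _ (Ne.symm hip)]
              exact I1 i hi0 hilen hip hpip
        -- I2'
        · intro c hclen hq0 hparc
          rw [List.length_set] at hclen
          have hc0 : 0 < c := by omega
          have hqne : ((pos-1)/2 - 1) / 2 ≠ pos := by omega
          rw [getD_set_ne _ _ _ _ (show pos ≠ ((pos-1)/2 - 1)/2 by omega)]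
          by_cases hcp : c = pos
          · rw [hcp, getD_set_self _ _ _ hpos]
            exact I1 ((pos-1)/2) hq0 hqlen (by omega) hqne
          · rw [getD_set_ne _ _ _ _ (Ne.symm hcp)]
            have h1 : pvLe (h.getD (((pos-1)/2 - 1)/2) (0,"")) (h.getD ((pos-1)/2) (0,"")) :=
              I1 ((pos-1)/2) hq0 hqlen (by omega) hqne
            have h2 : pvLe (h.getD ((pos-1)/2) (0,"")) (h.getD c (0,"")) :=
              hparc ▸ I1 c hc0 hclen hcp (by rw [hparc]; omega)
            exact le_trans h1 h2
        -- I3'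
        · intro c hclen hparc hc0
          rw [List.length_set] at hclen
          by_cases hcp : c = pos
          · rw [hcp, getD_set_self _ _ _ hpos]
            exact le_of_lt hlt'
          · rw [getD_set_ne _ _ _ _ (Ne.symm hcp)]
            have h2 : pvLe (h.getD ((pos-1)/2) (0,"")) (h.getD c (0,"")) :=
              hparc ▸ I1 c hc0 hclen hcp (by rw [hparc]; omega)
            exact le_trans (le_of_lt hlt') h2
      case isFalse hlt =>
        have hge : toLex (h.getD ((pos-1)/2) (0,"")) ≤ toLex n := by
          rw [pvLt_eq] at hlt
          exact not_lt.mp (by simpa using hlt)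
        exact ⟨pvPlace_inv h pos n hpos I1 I3 (fun _ => hge), List.Perm.refl _⟩

lemma pvSiftdown_spec (h : List (Int × String)) (pos : Nat) (n : Int × String)
    (hpos : pos < h.length)
    (I1 : ∀ i : Nat, 0 < i → i < h.length → i ≠ pos → (i - 1) / 2 ≠ pos →
      pvLe (h.getD ((i - 1) / 2) (0, "")) (h.getD i (0, "")))
    (I2 : ∀ c : Nat, c < h.length → 0 < pos → (c - 1) / 2 = pos →
      pvLe (h.getD ((pos - 1) / 2) (0, "")) (h.getD c (0, "")))
    (I3 : ∀ c : Nat, c < h.length → (c - 1) / 2 = pos → 0 < c →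
      pvLe n (h.getD c (0, ""))) :
    pvInv (pvSiftdown h 0 pos n) ∧ List.Perm (pvSiftdown h 0 pos n) (h.set pos n) :=
  pvSiftdownGo_spec pos h pos n le_rfl hpos I1 I2 I3

def pvJ1 (h : List (Int × String)) (p : Nat) : Prop :=
  ∀ i : Nat, 0 < i → i < h.length → i ≠ p → (i - 1) / 2 ≠ p →
    pvLe (h.getD ((i - 1) / 2) (0, "")) (h.getD i (0, ""))
def pvJ2 (h : List (Int × String)) (p : Nat) : Prop :=
  ∀ c : Nat, c < h.length → 0 < p → (c - 1) / 2 = p →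
    pvLe (h.getD ((p - 1) / 2) (0, "")) (h.getD c (0, ""))

lemma pvStep_J (h : List (Int × String)) (pos c' : Nat)
    (hpos : pos < h.length) (hc'len : c' < h.length) (hc'par : (c' - 1) / 2 = pos) (hc'gt : pos < c')
    (hmin : ∀ c : Nat, c < h.length → (c - 1) / 2 = pos → 0 < c → c ≠ c' →
      pvLe (h.getD c' (0, "")) (h.getD c (0, "")))
    (hJ1 : pvJ1 h pos) (hJ2 : pvJ2 h pos) :
    pvJ1 (h.set pos (h.getD c' (0, ""))) c' ∧ pvJ2 (h.set pos (h.getD c' (0, ""))) c' := by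
  constructor
  · intro i hi0 hilen hine hipar
    rw [List.length_set] at hilen
    by_cases hip : i = pos
    · subst hip
      have hp0 : 0 < i := hi0
      rw [getD_set_ne _ _ _ _ (show i ≠ (i-1)/2 by omega), getD_set_self _ _ _ hpos]
      exact hJ2 c' hc'len hp0 hc'par
    · by_cases hpip : (i - 1) / 2 = pos
      · rw [hpip, getD_set_self _ _ _ hpos, getD_set_ne _ _ _ _ (Ne.symm hip)]
        exact hmin i hilen hpip hi0 hine
      · rw [getD_set_ne _ _ _ _ (Ne.symm hpip), getD_set_ne _ _ _ _ (Ne.symm hip)]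
        exact hJ1 i hi0 hilen hip hpip
  · intro cc hcclen _ hccpar
    rw [List.length_set] at hcclen
    rw [hc'par, getD_set_self _ _ _ hpos, getD_set_ne _ _ _ _ (show pos ≠ cc by omega)]
    exact hccpar ▸ hJ1 cc (by omega) hcclen (by omega) (by rw [hccpar]; omega)

lemma pvSiftupLoopGo_spec (fuel : Nat) : ∀ (h : List (Int × String)) (pos : Nat),
    h.length - (2 * pos + 1) ≤ fuel → pos < h.length → pvJ1 h pos → pvJ2 h pos →
    (pvSiftupLoopGo fuel h h.length pos (2 * pos + 1)).2 < h.length ∧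
    (pvSiftupLoopGo fuel h h.length pos (2 * pos + 1)).1.length = h.length ∧
    h.length ≤ 2 * (pvSiftupLoopGo fuel h h.length pos (2 * pos + 1)).2 + 1 ∧
    pvJ1 (pvSiftupLoopGo fuel h h.length pos (2 * pos + 1)).1 (pvSiftupLoopGo fuel h h.length pos (2 * pos + 1)).2 ∧
    pvJ2 (pvSiftupLoopGo fuel h h.length pos (2 * pos + 1)).1 (pvSiftupLoopGo fuel h h.length pos (2 * pos + 1)).2 ∧
    ∀ x, List.Perm ((pvSiftupLoopGo fuel h h.length pos (2 * pos + 1)).1.set (pvSiftupLoopGo fuel h h.length pos (2 * pos + 1)).2 x) (h.set pos x) := by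
  induction fuel with
  | zero =>
    intro h pos hk hpos hJ1 hJ2
    refine ⟨hpos, rfl, ?_, hJ1, hJ2, fun x => List.Perm.refl _⟩
    show h.length ≤ 2 * pos + 1
    omega
  | succ fuel ih =>
    intro h pos hk hpos hJ1 hJ2
    simp only [pvSiftupLoopGo]
    split
    case isFalse hc =>
      exact ⟨hpos, rfl, by omega, hJ1, hJ2, fun x => List.Perm.refl _⟩
    case isTrue hc =>
      have hcond : (2 * pos + 1 + 1 < h.length && !(pvLt (h.getD (2*pos+1) (0,"")) (h.getD (2*pos+1+1) (0,"")))) =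
          decide (2 * pos + 1 + 1 < h.length ∧ toLex (h.getD (2*pos+1+1) (0,"")) ≤ toLex (h.getD (2*pos+1) (0,""))) := by
        rw [pvLt_eq, ← decide_not, ← Bool.decide_and]
        simp only [not_lt]
      rw [hcond]
      by_cases hsel : 2 * pos + 1 + 1 < h.length ∧ toLex (h.getD (2*pos+1+1) (0,"")) ≤ toLex (h.getD (2*pos+1) (0,""))
      · -- right child chosen: c' = 2*pos+2
        rw [decide_eq_true hsel, if_pos rfl]
        have hc'len : 2 * pos + 1 + 1 < h.length := hsel.1
        have hJ := pvStep_J h pos (2*pos+1+1) hpos hc'len (by omega) (by omega)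
          (fun c hcl hcp hc0 hcne => by
            have : c = 2*pos+1 := by omega
            subst this; exact hsel.2) hJ1 hJ2
        have := ih (h.set pos (h.getD (2*pos+1+1) (0,""))) (2*pos+1+1)
          (by simp; omega) (by simpa using hc'len) hJ.1 hJ.2
        rw [List.length_set] at this
        refine ⟨this.1, this.2.1, this.2.2.1, this.2.2.2.1, this.2.2.2.2.1, fun x => ?_⟩
        exact (this.2.2.2.2.2 x).trans (perm_set_set h pos (2*pos+1+1) x (by omega) hpos hc'len)
      · -- left child kept: c' = 2*pos+1
        rw [decide_eq_false hsel, if_neg (by simp)]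
        have hc'len : 2 * pos + 1 < h.length := hc
        have hJ := pvStep_J h pos (2*pos+1) hpos hc'len (by omega) (by omega)
          (fun c hcl hcp hc0 hcne => by
            have hcr : c = 2*pos+1+1 := by omega
            subst hcr
            have : ¬ toLex (h.getD (2*pos+1+1) (0,"")) ≤ toLex (h.getD (2*pos+1) (0,"")) := fun hle => hsel ⟨hcl, hle⟩
            exact le_of_lt (not_le.mp this)) hJ1 hJ2
        have := ih (h.set pos (h.getD (2*pos+1) (0,""))) (2*pos+1)
          (by simp; omega) (by simpa using hc'len) hJ.1 hJ.2
        rw [List.length_set] at this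
        refine ⟨this.1, this.2.1, this.2.2.1, this.2.2.2.1, this.2.2.2.2.1, fun x => ?_⟩
        exact (this.2.2.2.2.2 x).trans (perm_set_set h pos (2*pos+1) x (by omega) hpos hc'len)

lemma pvSiftupLoop_spec (h : List (Int × String)) (pos : Nat)
    (hpos : pos < h.length) (hJ1 : pvJ1 h pos) (hJ2 : pvJ2 h pos) :
    (pvSiftupLoop h h.length pos (2 * pos + 1)).2 < h.length ∧
    (pvSiftupLoop h h.length pos (2 * pos + 1)).1.length = h.length ∧
    h.length ≤ 2 * (pvSiftupLoop h h.length pos (2 * pos + 1)).2 + 1 ∧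
    pvJ1 (pvSiftupLoop h h.length pos (2 * pos + 1)).1 (pvSiftupLoop h h.length pos (2 * pos + 1)).2 ∧
    pvJ2 (pvSiftupLoop h h.length pos (2 * pos + 1)).1 (pvSiftupLoop h h.length pos (2 * pos + 1)).2 ∧
    ∀ x, List.Perm ((pvSiftupLoop h h.length pos (2 * pos + 1)).1.set (pvSiftupLoop h h.length pos (2 * pos + 1)).2 x) (h.set pos x) :=
  pvSiftupLoopGo_spec (h.length - (2 * pos + 1)) h pos le_rfl hpos hJ1 hJ2

lemma pvSiftup_zero_spec (H : List (Int × String)) (h0 : 0 < H.length) (hJ1 : pvJ1 H 0) :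
    pvInv (pvSiftup H 0) ∧ (pvSiftup H 0).Perm H := by
  have hJ2 : pvJ2 H 0 := fun c _ hc _ => absurd hc (lt_irrefl 0)
  have hloop := pvSiftupLoop_spec H 0 h0 hJ1 hJ2
  obtain ⟨hr2, hrlen, hleaf, hJ1', hJ2', hperm⟩ := hloop
  set r := pvSiftupLoop H H.length 0 (2 * 0 + 1) with hr
  set n := H.getD 0 (0, "") with hn
  have hsd := pvSiftdown_spec (r.1.set r.2 n) r.2 n
    (by rw [List.length_set, hrlen]; exact hr2)
    (fun i hi0 hilen hine hipar => by
      rw [List.length_set, hrlen] at hilen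
      rw [getD_set_ne _ _ _ _ (Ne.symm hipar), getD_set_ne _ _ _ _ (Ne.symm hine)]
      exact hJ1' i hi0 (by omega) hine hipar)
    (fun c hclen hq0 hcpar => by
      rw [List.length_set, hrlen] at hclen
      rw [getD_set_ne _ _ _ _ (show r.2 ≠ (r.2-1)/2 by omega), getD_set_ne _ _ _ _ (show r.2 ≠ c by omega)]
      exact hJ2' c (by omega) hq0 hcpar)
    (fun c hclen hcpar hc0 => by
      rw [List.length_set, hrlen] at hclen
      omega)
  have hfin : pvSiftup H 0 = pvSiftdown (r.1.set r.2 n) 0 r.2 n := rfl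
  rw [hfin]
  refine ⟨hsd.1, hsd.2.trans ?_⟩
  rw [List.set_set]
  have hH : H.set 0 n = H := by rw [hn, List.getD_eq_getElem _ _ h0]; exact List.set_getElem_self h0
  have hp := hperm n
  rw [hH] at hp
  exact hp

lemma getD_dropLast (h : List (Int×String)) (i : Nat) (hi : i < h.length - 1) :
    h.dropLast.getD i (0,"") = h.getD i (0,"") := by
  rw [List.getD_eq_getElem _ _ (by simp; omega), List.getD_eq_getElem _ _ (by omega)]
  simp [List.getElem_dropLast]

lemma pvRoot_min (h : List (Int × String)) (hh : pvInv h) :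
    ∀ y ∈ h, pvLe (h.getD 0 (0, "")) y := by
  have aux : ∀ i : Nat, i < h.length → pvLe (h.getD 0 (0, "")) (h.getD i (0, "")) := by
    intro i
    induction i using Nat.strong_induction_on with
    | _ i ih =>
      intro hi
      cases Nat.eq_zero_or_pos i with
      | inl h0 => subst h0; exact le_refl _
      | inr h0 =>
        exact le_trans (ih ((i-1)/2) (by omega) (by omega)) (hh i h0 hi)
  intro y hy
  obtain ⟨i, hi, rfl⟩ := List.mem_iff_getElem.mp hy
  exact (List.getD_eq_getElem h (0,"") hi) ▸ aux i hi

lemma pvPop_step (h : List (Int × String)) (hne : h ≠ []) (hh : pvInv h) (hlen : 2 ≤ h.length) :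
    pvInv (pvSiftup (h.dropLast.set 0 (h.getLast hne)) 0) ∧
    (h.getD 0 (0,"") :: pvSiftup (h.dropLast.set 0 (h.getLast hne)) 0).Perm h := by
  have hrest : 0 < h.dropLast.length := by simp; omega
  have hJ1 : pvJ1 (h.dropLast.set 0 (h.getLast hne)) 0 := by
    intro i hi0 hilen hine hipar
    rw [List.length_set] at hilen
    rw [getD_set_ne _ _ _ _ (Ne.symm hipar), getD_set_ne _ _ _ _ (Ne.symm hine),
        getD_dropLast _ _ (by simp at hilen; omega), getD_dropLast _ _ (by simp at hilen; omega)]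
    exact hh i hi0 (by simp at hilen; omega)
  have hsz := pvSiftup_zero_spec (h.dropLast.set 0 (h.getLast hne)) (by simpa using hrest) hJ1
  refine ⟨hsz.1, ?_⟩
  have h1 : (h.getD 0 (0,"") :: pvSiftup (h.dropLast.set 0 (h.getLast hne)) 0).Perm
      (h.getD 0 (0,"") :: h.dropLast.set 0 (h.getLast hne)) := hsz.2.cons _
  have h2 : (h.getD 0 (0,"") :: h.dropLast.set 0 (h.getLast hne)).Perm (h.getLast hne :: h.dropLast) := by
    have := perm_getD_set h.dropLast 0 (h.getLast hne) hrest
    rw [getD_dropLast _ _ (by omega)] at this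
    exact this
  have h3 : (h.getLast hne :: h.dropLast).Perm h := by
    have := List.perm_append_singleton (h.getLast hne) h.dropLast
    rw [List.dropLast_append_getLast hne] at this
    exact this.symm
  exact (h1.trans h2).trans h3

lemma sorted_cons_step (h h2 : List (Int × String)) (hh : pvInv h)
    (hperm : (h.getD 0 (0,"") :: h2).Perm h) :
    PySem.List.sorted h (fun p => toLex p) false =
      h.getD 0 (0,"") :: PySem.List.sorted h2 (fun p => toLex p) false := by
  apply PySem.List.eq_of_perm_of_pairwise_le_of_injective (fun p => toLex p) (fun a b hab => hab)
  · exact (PySem.List.sorted_perm h _ false).trans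
      (hperm.symm.trans ((PySem.List.sorted_perm h2 _ false).symm.cons _))
  · exact PySem.List.sorted_pairwise h _
  · rw [List.pairwise_cons]
    refine ⟨fun y hy => ?_, PySem.List.sorted_pairwise h2 _⟩
    have hyh : y ∈ h := hperm.mem_iff.mp (List.mem_cons_of_mem _ ((PySem.List.sorted_perm h2 _ false).mem_iff.mp hy))
    exact pvRoot_min h hh y hyh

lemma pvHeappush_spec (h : List (Int × String)) (x : Int × String) (hh : pvInv h) :
    pvInv (pvHeappush h x) ∧ (pvHeappush h x).Perm (h ++ [x]) := by
  have hlen : h.length < (h ++ [x]).length := by simp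
  have hget : ∀ i : Nat, i < h.length → (h ++ [x]).getD i (0,"") = h.getD i (0,"") := by
    intro i hi
    rw [List.getD_eq_getElem _ _ (by simp; omega), List.getD_eq_getElem _ _ hi]
    exact List.getElem_append_left hi
  have hsd := pvSiftdown_spec (h ++ [x]) h.length x hlen
    (fun i hi0 hilen hine hipar => by
      simp only [List.length_append, List.length_cons, List.length_nil] at hilen
      rw [hget i (by omega), hget ((i-1)/2) (by omega)]
      exact hh i hi0 (by omega))
    (fun c hclen h0 hcpar => by
      simp only [List.length_append, List.length_cons, List.length_nil] at hclen
      omega)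
    (fun c hclen hcpar hc0 => by
      simp only [List.length_append, List.length_cons, List.length_nil] at hclen
      omega)
  have hset : (h ++ [x]).set h.length x = h ++ [x] := by simp
  unfold pvHeappush
  rw [hset] at hsd
  exact hsd

lemma pvDrainGo_spec (fuel : Nat) : ∀ (h : List (Int × String)) (acc : List String),
    h.length ≤ fuel → pvInv h →
    pvDrainGo fuel h acc = acc ++ (PySem.List.sorted h (fun p => toLex p) false).map (fun t => t.2) := by
  induction fuel with
  | zero =>
    intro h acc hk _
    have : h = [] := List.eq_nil_of_length_eq_zero (by omega)
    subst this
    simp [pvDrainGo, PySem.List.sorted]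
  | succ fuel ih =>
    intro h acc hk hh
    simp only [pvDrainGo]
    split
    case isTrue hne =>
      subst hne
      simp [PySem.List.sorted]
    case isFalse hne =>
      split
      case isTrue hrest =>
        have hsingle : h = [h.getLast hne] := by
          conv_lhs => rw [← List.dropLast_append_getLast hne]
          rw [hrest]; rfl
        conv_rhs => rw [hsingle]
        simp [PySem.List.sorted, PySem.List.insertBy]
      case isFalse hrest =>
        have hlen2 : 2 ≤ h.length := by
          rcases h with _ | ⟨a, _ | ⟨b, t⟩⟩
          · exact absurd rfl hne
          · exact absurd rfl hrest
          · simp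
        have hstep := pvPop_step h hne hh hlen2
        have hlen' : (pvSiftup (h.dropLast.set 0 (h.getLast hne)) 0).length ≤ fuel := by
          rw [length_pvSiftup, List.length_set, List.length_dropLast]; omega
        rw [ih _ _ hlen' hstep.1]
        have hget0 : h.dropLast.getD 0 (0,"") = h.getD 0 (0,"") := getD_dropLast h 0 (by omega)
        rw [hget0, sorted_cons_step h _ hh hstep.2]
        simp

lemma pvDrain_spec (h : List (Int × String)) (acc : List String) (hh : pvInv h) :
    pvDrain h acc = acc ++ (PySem.List.sorted h (fun p => toLex p) false).map (fun t => t.2) :=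
  pvDrainGo_spec h.length h acc le_rfl hh

lemma pvBuild_spec (xs : List (Int × String)) : ∀ (q : List (Int × String)), pvInv q →
    pvInv (xs.foldl pvHeappush q) ∧ (xs.foldl pvHeappush q).Perm (q ++ xs) := by
  induction xs with
  | nil =>
    intro q hq
    exact ⟨hq, by simp⟩
  | cons x xs ih =>
    intro q hq
    have hp := pvHeappush_spec q x hq
    have := ih (pvHeappush q x) hp.1
    refine ⟨this.1, this.2.trans ?_⟩
    have := hp.2.append_right xs
    simpa using this

lemma insertBy_map (g : (Int × String) → (Int × String)) (bf : (Int × String) → (Int × String) → Bool)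
    (x : Int × String) (acc : List (Int × String)) :
    PySem.List.insertBy bf (g x) (acc.map g) =
      (PySem.List.insertBy (fun a b => bf (g a) (g b)) x acc).map g := by
  induction acc with
  | nil => simp [PySem.List.insertBy]
  | cons y ys ih =>
    simp only [List.map_cons, PySem.List.insertBy]
    split <;> simp_all

lemma sorted_map_aux (g : (Int × String) → (Int × String)) (key : (Int × String) → Lex (Int × String))
    (xs : List (Int × String)) : ∀ (acc : List (Int × String)),
    (xs.map g).foldl (fun acc x => PySem.List.insertBy (fun a b => decide (key a < key b)) x acc) (acc.map g) =
      (xs.foldl (fun acc x => PySem.List.insertBy (fun a b => decide (key (g a) < key (g b))) x acc) acc).map g := by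
  induction xs with
  | nil => intro acc; rfl
  | cons x xs ih =>
    intro acc
    simp only [List.map_cons, List.foldl_cons]
    rw [insertBy_map g (fun a b => decide (key a < key b)) x acc]
    exact ih _

lemma sorted_map (g : (Int × String) → (Int × String)) (key : (Int × String) → Lex (Int × String))
    (xs : List (Int × String)) :
    PySem.List.sorted (xs.map g) key false = (PySem.List.sorted xs (fun x => key (g x)) false).map g := by
  rw [PySem.List.sorted_eq_foldl_insertBy, PySem.List.sorted_eq_foldl_insertBy]
  exact sorted_map_aux g key xs []

lemma sorted2_eq (xs : List (Int × String)) (k1 : (Int × String) → Int) (k2 : (Int × String) → String) :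
    PySem.List.sorted2 xs k1 k2 false =
      PySem.List.sorted xs (fun x => toLex (k1 x, k2 x)) false := by
  have hbf : (fun a b => (decide (k1 a < k1 b) || (!decide (k1 b < k1 a) && decide (k2 a < k2 b))))
      = (fun a b => decide (toLex (k1 a, k2 a) < toLex (k1 b, k2 b))) := by
    funext a b
    by_cases h1 : k1 a < k1 b
    · simp [h1, Prod.Lex.lt_iff]
    · by_cases h2 : k1 b < k1 a
      · simp [h1, h2, Prod.Lex.lt_iff]
        omega
      · have heq : k1 a = k1 b := le_antisymm (not_lt.mp h2) (not_lt.mp h1)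
        simp [Prod.Lex.lt_iff, heq]
  rw [PySem.List.sorted_eq_foldl_insertBy]
  unfold PySem.List.sorted2
  simp only [Bool.false_eq_true, if_false]
  rw [hbf]


-- ===== VERDICT (by name: the statement is the Claim_ definition above) =====
theorem process_performance_requests_spec : Claim_equal_process_performance_requests := by
  intro requests _
  unfold Spec_process_performance_requests process_performance_requests_alt
  unfold process_performance_requests
  simp only []
  rw [List.foldl_map (f := fun pr : Int × String => (-pr.1, pr.2)) (g := pvHeappush) |>.symm]
  have hq := pvBuild_spec (requests.map (fun pr => (-pr.1, pr.2))) []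
    (fun i hi0 hil => by simp at hil)
  have hperm : (List.foldl pvHeappush [] (requests.map (fun pr => (-pr.1, pr.2)))).Perm
      (requests.map (fun pr => (-pr.1, pr.2))) := by
    have := hq.2
    simpa using this
  rw [pvDrain_spec _ [] hq.1]
  rw [PySem.List.sorted_eq_sorted_of_perm _ _ (fun p : Int × String => toLex p) (fun a b hab => hab) hperm]
  rw [sorted_map (fun pr => (-pr.1, pr.2)) (fun p => toLex p) requests]
  rw [sorted2_eq requests (fun t => -t.1) (fun t => t.2)]
  rw [List.map_map]
  rfl
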